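-- pv_equiv track=rewrite | github.com/itxcxm/Data_Structures_and_Algorithms | Smallest-Missing-Non-negative-Integer-After-Operations/Smallest-Missing-Non-negative-Integer-After-Operations.py | findMaximumMEX
-- ===== SOURCE A (Python) =====
-- def findMaximumMEX(nums, value):
--     DP = [0] * value
--
--     for n in nums:
--         DP[n % value] += 1
--
--     # tính số vòng lặp tối thiểu
--     rounds = min(DP)
--
--     for i in range(value):
--         if DP[i] - rounds == 0:
--             return (rounds * value) + i
-- ===== SOURCE B (Python) =====
-- def findMaximumMEX(nums, value):
--     counts = {}
--     for n in nums:
--         r = n % value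
--         counts[r] = counts.get(r, 0) + 1
--     mex = 0
--     while counts.get(mex % value, 0) > mex // value:
--         mex += 1
--     return mex
-- ===== Notes on version B (the rewrite author's own statement) =====
-- stated objective: alternative
-- what changed: Counts residues in a dict instead of a preallocated list and replaces the min(DP)-then-scan-for-first-index extraction by a direct walk of the integers that stops at the first m whose residue class can no longer cover it (counts[m%value] <= m//value).
import Mathlib
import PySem

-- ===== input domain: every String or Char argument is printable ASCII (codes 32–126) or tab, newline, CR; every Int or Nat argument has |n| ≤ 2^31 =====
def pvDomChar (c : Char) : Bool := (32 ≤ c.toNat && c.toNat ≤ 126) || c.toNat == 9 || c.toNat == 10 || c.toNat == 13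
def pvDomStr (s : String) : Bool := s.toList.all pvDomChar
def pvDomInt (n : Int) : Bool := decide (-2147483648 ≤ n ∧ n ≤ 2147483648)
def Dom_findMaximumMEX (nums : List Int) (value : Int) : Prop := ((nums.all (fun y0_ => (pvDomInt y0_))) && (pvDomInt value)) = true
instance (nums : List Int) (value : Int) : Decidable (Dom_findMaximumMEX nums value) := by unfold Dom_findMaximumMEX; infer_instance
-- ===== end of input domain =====

-- B replaces the residue-count list and min-then-first-index scan by a dict of residue
-- counts and a direct walk of the integers stopping at the first uncoverable one (alternative decomposition).

-- ===== PORT A =====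
-- A: DP = [0]*value; count residues; rounds = min(DP); return first i with DP[i]-rounds == 0.
def findMaximumMEX (nums : List Int) (value : Int) : Int :=
  let DP := nums.foldl
    (fun dp n =>
      PySem.List.pySetD dp (PySem.Int.mod n value)
        (PySem.List.pyGetD dp (PySem.Int.mod n value) 0 + 1))
    (List.replicate value.toNat 0)
  match PySem.List.min? DP (fun x => x) with
  | none => 0        -- unreachable under Pre_ (min([]) raises ValueError in Python)
  | some rounds =>
    match (PySem.List.pyRange 0 value 1).find? (fun i => PySem.List.pyGetD DP i 0 - rounds == 0) with
    | some i => rounds * value + i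
    | none => 0      -- unreachable under Pre_ (the Python loop always returns)

-- ===== PORT B =====
-- the while loop of Source B, with fuel only for totality (under Pre_ the fuel used is ample)
def bWalk (counts : PySem.Dict Int Int) (value : Int) : Nat → Int → Int
  | 0, mex => mex
  | fuel + 1, mex =>
    if counts.getD (PySem.Int.mod mex value) 0 > PySem.Int.floordiv mex value then
      bWalk counts value fuel (mex + 1)
    else mex

def findMaximumMEX_alt (nums : List Int) (value : Int) : Int :=
  let counts := nums.foldl
    (fun d n => d.insert (PySem.Int.mod n value) (d.getD (PySem.Int.mod n value) 0 + 1))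
    PySem.Dict.empty
  bWalk counts value ((nums.length + 1) * value.toNat + 1) 0

-- ===== PRECONDITION & SPEC =====
-- Pre_: A raises on every value ≤ 0 (ZeroDivisionError / IndexError / ValueError) and returns on every value > 0.
def Pre_findMaximumMEX (nums : List Int) (value : Int) : Prop := 0 < value
instance (nums : List Int) (value : Int) : Decidable (Pre_findMaximumMEX nums value) := by unfold Pre_findMaximumMEX; infer_instance
def pvWitness_findMaximumMEX : List Int × Int := ([0, 1, 5, -2], 3)
def Spec_findMaximumMEX (nums : List Int) (value : Int) (out : Int) : Prop := out = findMaximumMEX_alt nums value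
instance (nums : List Int) (value : Int) (out : Int) : Decidable (Spec_findMaximumMEX nums value out) := by unfold Spec_findMaximumMEX; infer_instance

-- ===== CLAIM (what is proved, stated in full; the proofs are below) =====
def Claim_equal_findMaximumMEX : Prop := ∀ (nums : List Int) (value : Int), Dom_findMaximumMEX nums value → Pre_findMaximumMEX nums value → Spec_findMaximumMEX nums value (findMaximumMEX nums value)

-- ===== LEMMAS AND PROOFS =====

-- residue count: how many elements of nums have n % value = r
def cntR (nums : List Int) (value r : Int) : Int :=
  ((nums.map (fun n => PySem.Int.mod n value)).count r : Int)

theorem length_pySetD (xs : List Int) (i v : Int) :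
    (PySem.List.pySetD xs i v).length = xs.length := by
  simp only [PySem.List.pySetD, PySem.List.pySet?]
  cases PySem.List.pyIdx? xs.length i <;> simp

theorem foldA_length (value : Int) (l : List Int) (dp : List Int) :
    (l.foldl (fun dp n =>
      PySem.List.pySetD dp (PySem.Int.mod n value)
        (PySem.List.pyGetD dp (PySem.Int.mod n value) 0 + 1)) dp).length = dp.length := by
  induction l generalizing dp with
  | nil => rfl
  | cons n l ih => rw [List.foldl_cons, ih, length_pySetD]

theorem foldA_getD (value : Int) (hv : 0 < value) (l : List Int) (dp : List Int)
    (hdp : dp.length = value.toNat) (r : Int) (hr0 : 0 ≤ r) (_hrv : r < value) :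
    PySem.List.pyGetD (l.foldl (fun dp n =>
      PySem.List.pySetD dp (PySem.Int.mod n value)
        (PySem.List.pyGetD dp (PySem.Int.mod n value) 0 + 1)) dp) r 0
      = PySem.List.pyGetD dp r 0 + cntR l value r := by
  induction l generalizing dp with
  | nil => simp [cntR]
  | cons n l ih =>
    have hrn0 : 0 ≤ PySem.Int.mod n value := PySem.Int.mod_nonneg n hv
    have hrnv : PySem.Int.mod n value < value := PySem.Int.mod_lt n hv
    have hlen' : (PySem.List.pySetD dp (PySem.Int.mod n value)
        (PySem.List.pyGetD dp (PySem.Int.mod n value) 0 + 1)).length = value.toNat := by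
      rw [length_pySetD]; exact hdp
    rw [List.foldl_cons, ih _ hlen']
    have hr' : r = ((r.toNat : Nat) : Int) := (Int.toNat_of_nonneg hr0).symm
    have hrn' : PySem.Int.mod n value = (((PySem.Int.mod n value).toNat : Nat) : Int) :=
      (Int.toNat_of_nonneg hrn0).symm
    have hlt : (PySem.Int.mod n value).toNat < dp.length := by rw [hdp]; omega
    have hc : cntR (n :: l) value r = cntR l value r + (if r = PySem.Int.mod n value then 1 else 0) := by
      simp only [cntR, List.map_cons, List.count_cons]
      by_cases h : r = PySem.Int.mod n value
      · simp [h]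
      · simp [h, Ne.symm h]
    rw [hc]
    rw [hr', hrn', PySem.List.pyGetD_pySetD_natCast dp _ _ _ 0 hlt]
    by_cases h : r.toNat = (PySem.Int.mod n value).toNat
    · have heq : r = PySem.Int.mod n value := by omega
      rw [if_pos h, if_pos (by omega)]
      rw [← hrn', ← hr', heq]
      ring
    · rw [if_neg h, if_neg (by omega)]
      rw [← hr']
      ring

theorem getD_replicate_zero (N : Nat) (r : Int) (hr0 : 0 ≤ r) :
    PySem.List.pyGetD (List.replicate N (0 : Int)) r 0 = 0 := by
  rw [(Int.toNat_of_nonneg hr0).symm, PySem.List.pyGetD_natCast]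
  simp only [List.getD, List.getElem?_replicate]
  split <;> rfl

theorem bWalk_eq (c : PySem.Dict Int Int) (v M : Int)
    (Hcont : ∀ k : Int, 0 ≤ k → k < M → c.getD (PySem.Int.mod k v) 0 > PySem.Int.floordiv k v)
    (Hstop : ¬ c.getD (PySem.Int.mod M v) 0 > PySem.Int.floordiv M v) :
    ∀ (fuel : Nat) (mex : Int), 0 ≤ mex → mex ≤ M → M.toNat < mex.toNat + fuel →
      bWalk c v fuel mex = M := by
  intro fuel
  induction fuel with
  | zero => intro mex h0 h1 h2; omega
  | succ f ih =>
    intro mex h0 h1 h2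
    rcases eq_or_lt_of_le h1 with he | hlt
    · subst he; simp only [bWalk]; rw [if_neg Hstop]
    · simp only [bWalk]; rw [if_pos (Hcont mex h0 hlt)]
      exact ih (mex + 1) (by omega) (by omega) (by omega)

-- proof-only abbreviations for the two fold states
def dpOf (nums : List Int) (value : Int) : List Int :=
  nums.foldl
    (fun dp n =>
      PySem.List.pySetD dp (PySem.Int.mod n value)
        (PySem.List.pyGetD dp (PySem.Int.mod n value) 0 + 1))
    (List.replicate value.toNat 0)

def dOf (nums : List Int) (value : Int) : PySem.Dict Int Int :=
  nums.foldl
    (fun d n => d.insert (PySem.Int.mod n value) (d.getD (PySem.Int.mod n value) 0 + 1))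
    PySem.Dict.empty

theorem findA_eq (nums : List Int) (value : Int) :
    findMaximumMEX nums value =
      (match PySem.List.min? (dpOf nums value) (fun x => x) with
       | none => 0
       | some rounds =>
         match (PySem.List.pyRange 0 value 1).find?
             (fun i => PySem.List.pyGetD (dpOf nums value) i 0 - rounds == 0) with
         | some i => rounds * value + i
         | none => 0) := rfl

theorem findB_eq (nums : List Int) (value : Int) :
    findMaximumMEX_alt nums value =
      bWalk (dOf nums value) value ((nums.length + 1) * value.toNat + 1) 0 := rfl

theorem cntR_nonneg (nums : List Int) (value r : Int) : 0 ≤ cntR nums value r := by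
  unfold cntR; exact Int.natCast_nonneg _

theorem dpOf_length (nums : List Int) (value : Int) :
    (dpOf nums value).length = value.toNat := by
  unfold dpOf; rw [foldA_length, List.length_replicate]

theorem dpOf_getD (nums : List Int) (value : Int) (hv : 0 < value) (r : Int)
    (hr0 : 0 ≤ r) (hrv : r < value) :
    PySem.List.pyGetD (dpOf nums value) r 0 = cntR nums value r := by
  unfold dpOf
  rw [foldA_getD value hv nums _ (List.length_replicate) r hr0 hrv,
    getD_replicate_zero _ r hr0, zero_add]

theorem dpOf_eq_map (nums : List Int) (value : Int) (hv : 0 < value) :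
    dpOf nums value = (List.range value.toNat).map (fun (k : Nat) => cntR nums value (k : Int)) := by
  apply List.ext_getElem
  · simp [dpOf_length]
  · intro i h1 h2
    have hiN : i < value.toNat := by rw [dpOf_length] at h1; exact h1
    have hl : (dpOf nums value)[i] = PySem.List.pyGetD (dpOf nums value) (i : Int) 0 := by
      rw [PySem.List.pyGetD_natCast, List.getD_eq_getElem _ _ h1]
    rw [hl, dpOf_getD nums value hv _ (Int.natCast_nonneg i) (by omega)]
    rw [List.getElem_map, List.getElem_range]

theorem dOf_getD (nums : List Int) (value r : Int) :
    (dOf nums value).getD r 0 = cntR nums value r := by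
  unfold dOf cntR
  rw [← List.foldl_map (f := fun n => PySem.Int.mod n value)
        (g := fun (d : PySem.Dict Int Int) x => d.insert x (d.getD x 0 + 1)),
    PySem.Dict.getD_foldl_insert_add_one, PySem.Dict.getD_empty, zero_add]

theorem main_eq (nums : List Int) (value : Int) (hv : 0 < value) :
    findMaximumMEX nums value = findMaximumMEX_alt nums value := by
  -- the minimum exists (DP is nonempty)
  obtain ⟨rounds, hmin⟩ : ∃ r, PySem.List.min? (dpOf nums value) (fun x => x) = some r := by
    cases h : PySem.List.min? (dpOf nums value) (fun x => x) with
    | none =>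
      exfalso
      have hnil := (PySem.List.min?_eq_none_iff _ _).mp h
      have hlen := dpOf_length nums value
      rw [hnil] at hlen
      simp at hlen
      omega
    | some r => exact ⟨r, rfl⟩
  have Hmin : ∀ r : Int, 0 ≤ r → r < value → rounds ≤ cntR nums value r := by
    intro r h0 h1
    refine PySem.List.min?_id_le hmin _ ?_
    rw [dpOf_eq_map nums value hv]
    have hrt : r.toNat < value.toNat := by omega
    refine List.mem_map.mpr ⟨r.toNat, List.mem_range.mpr hrt, ?_⟩
    rw [Int.toNat_of_nonneg h0]
  obtain ⟨j, hjN, hjeq⟩ : ∃ j : Nat, j < value.toNat ∧ cntR nums value (j : Int) = rounds := by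
    have hmem := PySem.List.min?_mem hmin
    rw [dpOf_eq_map nums value hv] at hmem
    obtain ⟨j, hj, hje⟩ := List.mem_map.mp hmem
    exact ⟨j, List.mem_range.mp hj, hje⟩
  have hrnn : 0 ≤ rounds := hjeq ▸ cntR_nonneg nums value _
  -- the first-index scan succeeds
  obtain ⟨i0, hfind⟩ : ∃ i0, (PySem.List.pyRange 0 value 1).find?
      (fun i => PySem.List.pyGetD (dpOf nums value) i 0 - rounds == 0) = some i0 := by
    have hsome : (((PySem.List.pyRange 0 value 1).find?
        (fun i => PySem.List.pyGetD (dpOf nums value) i 0 - rounds == 0))).isSome := by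
      refine List.find?_isSome.mpr ⟨(j : Int), ?_, ?_⟩
      · exact PySem.List.mem_pyRange_one.mpr ⟨Int.natCast_nonneg j, by omega⟩
      · rw [dpOf_getD nums value hv _ (Int.natCast_nonneg j) (by omega), hjeq]
        simp
    exact ⟨_, Option.eq_some_of_isSome hsome⟩
  obtain ⟨hp0, idx, hidx, hival, hfirst'⟩ := List.find?_eq_some_iff_getElem.mp hfind
  rw [PySem.List.getElem_pyRange_one _ _ _ hidx, zero_add] at hival
  have hidxN : idx < value.toNat := by
    have := hidx; rw [PySem.List.length_pyRange_one] at this; omega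
  have hi00 : 0 ≤ i0 := by omega
  have hi0v : i0 < value := by omega
  have hci0 : cntR nums value i0 = rounds := by
    rw [dpOf_getD nums value hv _ hi00 hi0v] at hp0
    have := beq_iff_eq.mp hp0
    omega
  have hfirst : ∀ r : Int, 0 ≤ r → r < i0 → cntR nums value r ≠ rounds := by
    intro r h0 h1
    have hrN : r.toNat < idx := by omega
    have hnb := hfirst' r.toNat hrN
    rw [PySem.List.getElem_pyRange_one _ _ _ (Nat.lt_trans hrN hidx), zero_add] at hnb
    rw [dpOf_getD nums value hv _ (Int.natCast_nonneg _) (by omega)] at hnb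
    simp only [Bool.not_eq_eq_eq_not, Bool.not_true, beq_eq_false_iff_ne, ne_eq] at hnb
    rw [Int.toNat_of_nonneg h0] at hnb
    omega
  -- both sides equal rounds * value + i0
  rw [findA_eq, hmin]
  simp only [hfind]
  rw [findB_eq]
  symm
  apply bWalk_eq (dOf nums value) value (rounds * value + i0)
  · -- Hcont
    intro k hk0 hkM
    have hq0 : 0 ≤ k / value := Int.ediv_nonneg hk0 hv.le
    have hr0 : 0 ≤ k % value := Int.emod_nonneg k (ne_of_gt hv)
    have hrv : k % value < value := Int.emod_lt_of_pos k hv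
    have hk : value * (k / value) + k % value = k := Int.mul_ediv_add_emod k value
    rw [PySem.Int.mod_eq_emod_of_pos hv, PySem.Int.floordiv_eq_ediv_of_pos hv, dOf_getD]
    have hle : k / value ≤ rounds := by
      by_contra hc
      rw [not_le] at hc
      have h1 : value * (rounds + 1) ≤ value * (k / value) :=
        mul_le_mul_of_nonneg_left (by omega) hv.le
      have h2 : value * (rounds + 1) = rounds * value + value := by ring
      linarith
    rcases lt_or_eq_of_le hle with hqlt | hqeq
    · have := Hmin _ hr0 hrv
      omega
    · have hri : k % value < i0 := by
        have h2 : value * rounds = rounds * value := mul_comm _ _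
        rw [hqeq] at hk
        linarith
      have hne := hfirst _ hr0 hri
      have hge := Hmin _ hr0 hrv
      omega
  · -- Hstop
    have hmod : PySem.Int.mod (rounds * value + i0) value = i0 := by
      rw [PySem.Int.mod_eq_emod_of_pos hv, add_comm]
      have h1 : (i0 + rounds * value) % value = i0 % value := by simp
      rw [h1, Int.emod_eq_of_lt hi00 hi0v]
    have hdiv : PySem.Int.floordiv (rounds * value + i0) value = rounds := by
      rw [PySem.Int.floordiv_eq_ediv_of_pos hv, add_comm,
        Int.add_mul_ediv_right i0 rounds (ne_of_gt hv),
        Int.ediv_eq_zero_of_lt hi00 hi0v, zero_add]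
    rw [hmod, hdiv, dOf_getD, hci0]
    omega
  · omega
  · have := mul_nonneg hrnn hv.le; omega
  · -- fuel bound
    have hc0 : cntR nums value 0 ≤ (nums.length : Int) := by
      unfold cntR
      have := List.count_le_length (a := (0 : Int))
        (l := nums.map (fun n => PySem.Int.mod n value))
      have hlen : (nums.map (fun n => PySem.Int.mod n value)).length = nums.length :=
        List.length_map ..
      omega
    have hrle : rounds ≤ (nums.length : Int) := le_trans (Hmin 0 le_rfl hv) hc0
    have hMlt : rounds * value + i0 < ((nums.length : Int) + 1) * value := by
      have h1 : rounds * value ≤ (nums.length : Int) * value :=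
        mul_le_mul_of_nonneg_right hrle hv.le
      have h2 : ((nums.length : Int) + 1) * value = (nums.length : Int) * value + value := by
        ring
      linarith
    have hcast : (((nums.length + 1) * value.toNat : Nat) : Int)
        = ((nums.length : Int) + 1) * value := by
      push_cast [Int.toNat_of_nonneg hv.le]
      ring
    have hM0 : 0 ≤ rounds * value + i0 := by have := mul_nonneg hrnn hv.le; omega
    omega

theorem findMaximumMEX_spec : Claim_equal_findMaximumMEX := by
  intro nums value _ hv
  exact main_eq nums value hv
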